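-- pv_equiv track=rewrite | github.com/lixiang2017/leetcode | problems/1044.0_Longest_Duplicate_Substring.py | search
-- ===== SOURCE A (Python) =====
-- from typing import List
--
-- def search(L: int, b: int, module: int, N: int, nums: List[int]) -> int:
--     '''
--     Rabin-Karp with polynomial rolling hash.
--     Search a substring of given length that occurs at least 2 times.
--     @return start position if the substring exists, -1 otherwise.
--     '''
--     # compute the hash of string s[: L]
--     h = 0
--     for i in range(L):
--         h = (h * b + nums[i]) % module
--
--     # already seen hashes of strings of length L
--     seen = {h}
--     # const value to be used often: b**L % module
--     bL = pow(b, L, module)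
--     for start in range(1, N - L + 1):
--         # compute rolling hash in O(1) time
--         h = (h * b - nums[start - 1] * bL + nums[start + L - 1]) % module
--         if h in seen:
--             return start
--         seen.add(h)
--     return -1
-- ===== SOURCE B (Python) =====
-- def search(L: int, b: int, module: int, N: int, nums):
--     '''
--     Prefix-hash reformulation: P[k] is the hash of nums[:k]; each length-L
--     window hash is computed in O(1) from P instead of by a rolling update.
--     '''
--     P = [0]
--     acc = 0
--     for x in nums:
--         acc = (acc * b + x) % module
--         P.append(acc)
--     bL = pow(b, L, module)
--     seen = {(P[L] - P[0] * bL) % module}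
--     for start in range(1, N - L + 1):
--         h = (P[start + L] - P[start] * bL) % module
--         if h in seen:
--             return start
--         seen.add(h)
--     return -1
-- ===== Notes on version B (the rewrite author's own statement) =====
-- stated objective: alternative
-- what changed: B replaces A's rolling-hash update (each window hash derived from the previous one) by a precomputed prefix-hash array P, computing every length-L window hash independently as (P[start+L]-P[start]*b^L) % module.
-- outside the precondition, e.g. on search(-1, 2, 3, 4, [-3, 2, 3, -3]): A returns 1, B returns 2
import Mathlib
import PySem

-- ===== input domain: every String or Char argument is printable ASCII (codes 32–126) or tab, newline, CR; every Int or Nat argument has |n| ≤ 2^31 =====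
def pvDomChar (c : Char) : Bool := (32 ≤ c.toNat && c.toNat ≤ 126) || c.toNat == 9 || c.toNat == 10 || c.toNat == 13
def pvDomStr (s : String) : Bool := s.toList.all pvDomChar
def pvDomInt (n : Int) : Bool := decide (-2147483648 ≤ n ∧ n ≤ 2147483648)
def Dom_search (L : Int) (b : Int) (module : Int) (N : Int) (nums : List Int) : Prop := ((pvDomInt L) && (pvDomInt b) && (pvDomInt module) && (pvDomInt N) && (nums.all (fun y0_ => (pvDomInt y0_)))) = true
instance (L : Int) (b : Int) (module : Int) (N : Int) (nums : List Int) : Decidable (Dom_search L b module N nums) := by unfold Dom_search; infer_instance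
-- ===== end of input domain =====

-- B replaces A's rolling-hash update by a precomputed prefix-hash array; same O(N) cost, different decomposition.

-- ===== PORT A =====
-- the rolling-hash loop over starts, with state (h, seen); early return = returning start
def searchALoop (L : Int) (b : Int) (module : Int) (bL : Int) (nums : List Int) :
    List Int → Int → PySem.Set Int → Int
  | [], _, _ => -1
  | start :: rest, h, seen =>
    let h' := PySem.Int.mod (h * b - PySem.List.pyGetD nums (start - 1) 0 * bL
                + PySem.List.pyGetD nums (start + L - 1) 0) module
    if PySem.Set.contains seen h' then start
    else searchALoop L b module bL nums rest h' (PySem.Set.add seen h')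

def search (L : Int) (b : Int) (module : Int) (N : Int) (nums : List Int) : Int :=
  let h := (PySem.List.pyRange 0 L 1).foldl
      (fun h i => PySem.Int.mod (h * b + PySem.List.pyGetD nums i 0) module) 0
  let seen := PySem.Set.ofList [h]
  let bL := PySem.Int.powMod b L.toNat module
  searchALoop L b module bL nums (PySem.List.pyRange 1 (N - L + 1) 1) h seen

-- ===== PORT B =====
-- P = [0]; acc = 0; for x in nums: acc = (acc*b+x)%module; P.append(acc)
def searchBPrefix (b : Int) (module : Int) (nums : List Int) : List Int :=
  (nums.foldl (fun st x =>
      let acc := PySem.Int.mod (st.2 * b + x) module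
      (st.1 ++ [acc], acc)) ([0], 0)).1

def searchBLoop (L : Int) (_b : Int) (module : Int) (bL : Int) (P : List Int) :
    List Int → PySem.Set Int → Int
  | [], _ => -1
  | start :: rest, seen =>
    let h := PySem.Int.mod (PySem.List.pyGetD P (start + L) 0
                - PySem.List.pyGetD P start 0 * bL) module
    if PySem.Set.contains seen h then start
    else searchBLoop L _b module bL P rest (PySem.Set.add seen h)

def search_alt (L : Int) (b : Int) (module : Int) (N : Int) (nums : List Int) : Int :=
  let P := searchBPrefix b module nums
  let bL := PySem.Int.powMod b L.toNat module
  let seen := PySem.Set.ofList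
      [PySem.Int.mod (PySem.List.pyGetD P L 0 - PySem.List.pyGetD P 0 0 * bL) module]
  searchBLoop L b module bL P (PySem.List.pyRange 1 (N - L + 1) 1) seen

-- ===== PRECONDITION & SPEC =====
-- Pre_ excludes module = 0 (ZeroDivisionError) and index configurations past the end of nums
-- (IndexError), and also negative L, where Python's three-argument pow raises ValueError for
-- non-invertible bases and where B's prefix-hash indexing P[L] naturally means something else.
def Pre_search (L : Int) (b : Int) (module : Int) (N : Int) (nums : List Int) : Prop :=
  module ≠ 0 ∧ 0 ≤ L ∧ L ≤ (nums.length : Int) ∧ N ≤ (nums.length : Int)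
instance (L : Int) (b : Int) (module : Int) (N : Int) (nums : List Int) : Decidable (Pre_search L b module N nums) := by unfold Pre_search; infer_instance

def pvWitness_search : Int × Int × Int × Int × List Int := (1, 31, 97, 3, [5, 5, 7])

def Spec_search (L : Int) (b : Int) (module : Int) (N : Int) (nums : List Int) (out : Int) : Prop := out = search_alt L b module N nums
instance (L : Int) (b : Int) (module : Int) (N : Int) (nums : List Int) (out : Int) : Decidable (Spec_search L b module N nums out) := by unfold Spec_search; infer_instance

-- ===== CLAIM (what is proved, stated in full; the proofs are below) =====
def Claim_equal_search : Prop := ∀ (L : Int) (b : Int) (module : Int) (N : Int) (nums : List Int), Dom_search L b module N nums → Pre_search L b module N nums → Spec_search L b module N nums (search L b module N nums)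

-- ===== LEMMAS AND PROOFS =====

-- the chain of stored prefix hashes: pfx k = P[k]
def pfx (b : Int) (module : Int) (nums : List Int) : Nat → Int
  | 0 => 0
  | k + 1 => PySem.Int.mod (pfx b module nums k * b + nums.getD k 0) module

lemma mod_sub_self_dvd (m x : Int) : m ∣ (PySem.Int.mod x m - x) := by
  have h := PySem.Int.floordiv_mul_add_mod x m
  exact ⟨-(PySem.Int.floordiv x m), by linarith⟩

-- Python % respects congruence: congruent arguments give the same remainder
lemma mod_congr (m x y : Int) (hm : m ≠ 0) (h : m ∣ (x - y)) :
    PySem.Int.mod x m = PySem.Int.mod y m := by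
  have d1 := mod_sub_self_dvd m x
  have d2 := mod_sub_self_dvd m y
  have hd : m ∣ (PySem.Int.mod x m - PySem.Int.mod y m) := by
    have : PySem.Int.mod x m - PySem.Int.mod y m
        = (PySem.Int.mod x m - x) - (PySem.Int.mod y m - y) + (x - y) := by ring
    rw [this]; exact dvd_add (dvd_sub d1 d2) h
  have hz : PySem.Int.mod x m - PySem.Int.mod y m = 0 := by
    rcases lt_or_gt_of_ne hm with hneg | hpos
    · have b1 := PySem.Int.mod_neg_bounds (a := x) hneg
      have b2 := PySem.Int.mod_neg_bounds (a := y) hneg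
      apply Int.eq_zero_of_abs_lt_dvd ((neg_dvd).mpr hd)
      rw [abs_lt]; omega
    · have b1l := PySem.Int.mod_nonneg (a := x) hpos
      have b1r := PySem.Int.mod_lt (a := x) hpos
      have b2l := PySem.Int.mod_nonneg (a := y) hpos
      have b2r := PySem.Int.mod_lt (a := y) hpos
      apply Int.eq_zero_of_abs_lt_dvd hd
      rw [abs_lt]; omega
  omega

-- B's prefix array is exactly the chain pfx
lemma pfx_append (b m : Int) (nums : List Int) (x : Int) :
    ∀ (k : Nat), k ≤ nums.length → pfx b m (nums ++ [x]) k = pfx b m nums k := by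
  intro k
  induction k with
  | zero => intro _; rfl
  | succ k ih =>
    intro hk
    simp only [pfx, ih (by omega)]
    congr 2
    rw [List.getD_append _ _ _ _ (by omega)]

lemma prefix_inv (b m : Int) (nums : List Int) :
    nums.foldl (fun st x =>
      let acc := PySem.Int.mod (st.2 * b + x) m
      (st.1 ++ [acc], acc)) ([0], 0)
    = ((List.range (nums.length + 1)).map (pfx b m nums), pfx b m nums nums.length) := by
  induction nums using List.reverseRecOn with
  | nil => simp [pfx, List.range_succ]
  | append_singleton ns x ih =>
    rw [List.foldl_append, ih]
    simp only [List.foldl_cons, List.foldl_nil, List.length_append, List.length_singleton]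
    have hlast : pfx b m (ns ++ [x]) (ns.length + 1)
        = PySem.Int.mod (pfx b m ns ns.length * b + x) m := by
      simp only [pfx, pfx_append b m ns x ns.length le_rfl]
      congr 2
      rw [List.getD_append_right _ _ _ _ le_rfl]
      simp
    rw [Prod.mk.injEq]
    constructor
    · rw [List.range_succ (n := ns.length + 1), List.map_append]
      congr 1
      · apply List.map_congr_left
        intro k hk
        rw [List.mem_range] at hk
        exact (pfx_append b m ns x k (by omega)).symm
      · simp [hlast]
    · exact hlast.symm

lemma prefix_getD (b m : Int) (nums : List Int) (i : Int) (h0 : 0 ≤ i)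
    (hi : i ≤ (nums.length : Int)) :
    PySem.List.pyGetD (searchBPrefix b m nums) i 0 = pfx b m nums i.toNat := by
  have hP : searchBPrefix b m nums = (List.range (nums.length + 1)).map (pfx b m nums) := by
    unfold searchBPrefix
    rw [prefix_inv]
  rw [hP]
  rw [show i = ((i.toNat : Nat) : Int) from (Int.toNat_of_nonneg h0).symm]
  rw [PySem.List.pyGetD_natCast]
  rw [List.getD_eq_getElem _ _ (by simp; omega), List.getElem_map, List.getElem_range]
  congr 1



-- A's initial loop computes pfx
lemma init_eq (b m : Int) (nums : List Int) (k : Nat) (hk : k ≤ nums.length) :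
    (PySem.List.pyRange 0 (k : Int) 1).foldl
      (fun h i => PySem.Int.mod (h * b + PySem.List.pyGetD nums i 0) m) 0
    = pfx b m nums k := by
  induction k with
  | zero => rw [PySem.List.pyRange_one_eq_nil (by omega)]; rfl
  | succ k ih =>
    rw [show ((k + 1 : Nat) : Int) = (k : Int) + 1 by push_cast; ring]
    rw [PySem.List.pyRange_one_succ_right (by positivity)]
    rw [List.foldl_append]
    rw [ih (by omega)]
    simp [pfx]

lemma mod_pfx (b m : Int) (hm : m ≠ 0) (nums : List Int) (k : Nat) :
    PySem.Int.mod (pfx b m nums k) m = pfx b m nums k := by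
  cases k with
  | zero =>
    show PySem.Int.mod 0 m = 0
    exact (PySem.Int.mod_eq_zero_iff_dvd 0 m).mpr (dvd_zero m)
  | succ k =>
    show PySem.Int.mod (PySem.Int.mod _ m) m = _
    exact mod_congr m _ _ hm (mod_sub_self_dvd m _)

lemma pyGetD_toNat (xs : List Int) (i : Int) (h0 : 0 ≤ i) :
    PySem.List.pyGetD xs i 0 = xs.getD i.toNat 0 := by
  rw [show i = ((i.toNat : Nat) : Int) from (Int.toNat_of_nonneg h0).symm]
  rw [PySem.List.pyGetD_natCast]
  congr 2
  omega

-- the two loops agree, given A's incoming h is the previous window hash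
lemma loop_eq (L b m bL : Int) (nums : List Int) (hm : m ≠ 0) (hL : 0 ≤ L)
    (e : Int) (he : e ≤ (nums.length : Int) - L + 1) :
    ∀ (s : Int), 1 ≤ s → ∀ (h : Int) (seen : PySem.Set Int),
      h = PySem.Int.mod (pfx b m nums (s - 1 + L).toNat - pfx b m nums (s - 1).toNat * bL) m →
      searchALoop L b m bL nums (PySem.List.pyRange s e 1) h seen
      = searchBLoop L b m bL (searchBPrefix b m nums) (PySem.List.pyRange s e 1) seen := by
  suffices main : ∀ (n : Nat) (s : Int), (e - s).toNat = n → 1 ≤ s →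
      ∀ (h : Int) (seen : PySem.Set Int),
      h = PySem.Int.mod (pfx b m nums (s - 1 + L).toNat - pfx b m nums (s - 1).toNat * bL) m →
      searchALoop L b m bL nums (PySem.List.pyRange s e 1) h seen
      = searchBLoop L b m bL (searchBPrefix b m nums) (PySem.List.pyRange s e 1) seen by
    intro s hs h seen hh
    exact main (e - s).toNat s rfl hs h seen hh
  intro n
  induction n with
  | zero =>
    intro s hn hs h seen hh
    rw [PySem.List.pyRange_one_eq_nil (by omega)]
    rfl
  | succ n ih =>
    intro s hn hs h seen hh
    have hse : s < e := by omega
    rw [PySem.List.pyRange_one_cons hse]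
    simp only [searchALoop, searchBLoop]
    have hhb : PySem.Int.mod (h * b - PySem.List.pyGetD nums (s - 1) 0 * bL
                + PySem.List.pyGetD nums (s + L - 1) 0) m
        = PySem.Int.mod (PySem.List.pyGetD (searchBPrefix b m nums) (s + L) 0
                - PySem.List.pyGetD (searchBPrefix b m nums) s 0 * bL) m := by
      rw [prefix_getD b m nums (s + L) (by omega) (by omega)]
      rw [prefix_getD b m nums s (by omega) (by omega)]
      rw [pyGetD_toNat nums (s - 1) (by omega), pyGetD_toNat nums (s + L - 1) (by omega)]
      apply mod_congr m _ _ hm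
      have d0 : m ∣ h - (pfx b m nums (s - 1 + L).toNat - pfx b m nums (s - 1).toNat * bL) := by
        rw [hh]; exact mod_sub_self_dvd m _
      have e1 : (s + L).toNat = (s - 1 + L).toNat + 1 := by omega
      have e2 : s.toNat = (s - 1).toNat + 1 := by omega
      have d1 : m ∣ pfx b m nums (s + L).toNat
          - (pfx b m nums (s - 1 + L).toNat * b + nums.getD (s + L - 1).toNat 0) := by
        rw [e1]
        have e3 : (s - 1 + L).toNat = (s + L - 1).toNat := by omega
        rw [show pfx b m nums ((s - 1 + L).toNat + 1)
            = PySem.Int.mod (pfx b m nums (s - 1 + L).toNat * b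
                + nums.getD (s - 1 + L).toNat 0) m from rfl]
        rw [e3]
        exact mod_sub_self_dvd m _
      have d2 : m ∣ pfx b m nums s.toNat
          - (pfx b m nums (s - 1).toNat * b + nums.getD (s - 1).toNat 0) := by
        rw [e2]
        exact mod_sub_self_dvd m _
      have key : h * b - nums.getD (s - 1).toNat 0 * bL + nums.getD (s + L - 1).toNat 0
          - (pfx b m nums (s + L).toNat - pfx b m nums s.toNat * bL)
          = (h - (pfx b m nums (s - 1 + L).toNat - pfx b m nums (s - 1).toNat * bL)) * b
            - (pfx b m nums (s + L).toNat
                - (pfx b m nums (s - 1 + L).toNat * b + nums.getD (s + L - 1).toNat 0))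
            + (pfx b m nums s.toNat
                - (pfx b m nums (s - 1).toNat * b + nums.getD (s - 1).toNat 0)) * bL := by
        ring
      rw [key]
      exact dvd_add (dvd_sub (Dvd.dvd.mul_right d0 b) d1) (Dvd.dvd.mul_right d2 bL)
    rw [hhb]
    split_ifs with hc
    · rfl
    · apply ih (s + 1) (by omega) (by omega)
      rw [prefix_getD b m nums (s + L) (by omega) (by omega),
          prefix_getD b m nums s (by omega) (by omega)]
      have i1 : (s + 1 - 1 + L).toNat = (s + L).toNat := by omega
      have i2 : (s + 1 - 1).toNat = s.toNat := by omega
      rw [i1, i2]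

-- ===== VERDICT (by name: the statement is the Claim_ definition above) =====
theorem search_spec : Claim_equal_search := by
  intro L b module N nums _ hpre
  obtain ⟨hm, hL, hLn, hN⟩ := hpre
  show search L b module N nums = search_alt L b module N nums
  simp only [search, search_alt]
  have hinit : (PySem.List.pyRange 0 L 1).foldl
      (fun h i => PySem.Int.mod (h * b + PySem.List.pyGetD nums i 0) module) 0
      = pfx b module nums L.toNat := by
    rw [show L = ((L.toNat : Nat) : Int) from (Int.toNat_of_nonneg hL).symm]
    exact init_eq b module nums L.toNat (by omega)
  have hseed : PySem.Int.mod (PySem.List.pyGetD (searchBPrefix b module nums) L 0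
      - PySem.List.pyGetD (searchBPrefix b module nums) 0 0
        * PySem.Int.powMod b L.toNat module) module
      = pfx b module nums L.toNat := by
    rw [prefix_getD b module nums L hL hLn,
        prefix_getD b module nums 0 le_rfl (by positivity)]
    rw [show ((0 : Int)).toNat = 0 from rfl]
    rw [show pfx b module nums 0 = 0 from rfl]
    rw [show pfx b module nums L.toNat - 0 * PySem.Int.powMod b L.toNat module
        = pfx b module nums L.toNat by ring]
    exact mod_pfx b module hm nums L.toNat
  rw [hinit, hseed]
  apply loop_eq L b module (PySem.Int.powMod b L.toNat module) nums hm hL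
      (N - L + 1) (by omega) 1 le_rfl
  rw [show (1 - 1 + L : Int) = L by ring, show ((1 - 1 : Int)).toNat = 0 from rfl]
  rw [show pfx b module nums 0 = 0 from rfl]
  rw [show pfx b module nums L.toNat - 0 * PySem.Int.powMod b L.toNat module
      = pfx b module nums L.toNat by ring]
  exact (mod_pfx b module hm nums L.toNat).symm
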